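-- pv_equiv track=rewrite | github.com/pypi-data/pypi-mirror-43 | packages/data-class-detection/data_class_detection-0.0.6.tar.gz/data_class_detection-0.0.6/data_class_detection/parser/ast.py | break_word
-- ===== SOURCE A (Python) =====
-- def break_word(text):
--     if '_' in text and text.upper() == text:
--         word = text.lower().split('_')
--     else:
--         i = 0
--         j = 0
--         word = []
--         while j < len(text):
--             while j < len(text) and not (text[j] >= 'A' and text[j] <= 'Z'):
--                 j += 1
--             if i == j:
--                 j += 1
--                 continue
--             word.append(text[i:j].lower())
--             i = j
--             j += 1
--         if not i == j and j < len(text):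
--             word.append(text[i:j])
--     word = [w for w in word if len(w)>1]
--     return word
-- ===== SOURCE B (Python) =====
-- def break_word(text):
--     if '_' in text and text.upper() == text:
--         words = text.lower().split('_')
--     else:
--         words = []
--         for ch in text:
--             if 'A' <= ch <= 'Z' or not words:
--                 words.append(ch.lower())
--             else:
--                 words[-1] += ch.lower()
--     return [w for w in words if len(w) > 1]
-- ===== Notes on version B (the rewrite author's own statement) =====
-- stated objective: simpler
-- what changed: Replaced the two-level index/slice scanning loop (and its dead tail append) by a single per-character fold that starts a new word at each ASCII uppercase letter and extends the last word otherwise; the len>1 filter makes the trailing lone-uppercase segment A drops irrelevant.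
import Mathlib
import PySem

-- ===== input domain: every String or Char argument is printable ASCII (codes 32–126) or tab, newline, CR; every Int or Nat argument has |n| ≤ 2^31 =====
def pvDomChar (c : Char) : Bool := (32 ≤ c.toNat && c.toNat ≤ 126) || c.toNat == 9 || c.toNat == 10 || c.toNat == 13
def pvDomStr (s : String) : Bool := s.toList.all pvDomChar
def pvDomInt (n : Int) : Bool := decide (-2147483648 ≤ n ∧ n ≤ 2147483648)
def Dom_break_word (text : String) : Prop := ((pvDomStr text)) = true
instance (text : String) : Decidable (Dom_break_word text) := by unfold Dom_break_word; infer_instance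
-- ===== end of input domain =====

-- B replaces A's two-level index/slice scanning loop by a single per-character fold (simpler); equal results on all inputs.

-- shared helper: Python's `text[j] >= 'A' and text[j] <= 'Z'` / `'A' <= ch <= 'Z'` (ASCII uppercase test)
def bwUpper (c : Char) : Bool := decide ('A' ≤ c ∧ c ≤ 'Z')

-- ===== PORT A =====
-- inner `while j < len(text) and not (...)`: advances j over non-uppercase characters
def bwSkip (cs : List Char) (j : Nat) : Nat :=
  if h : j < cs.length ∧ bwUpper (cs.getD j ' ') = false then bwSkip cs (j + 1) else j
termination_by cs.length - j
decreasing_by omega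

theorem bwSkip_ge (cs : List Char) (j : Nat) : j ≤ bwSkip cs j := by
  fun_induction bwSkip cs j with
  | case1 j h ih => omega
  | case2 j h => omega

-- outer `while j < len(text): ...`, returning the final (i, j, word)
def bwLoop (cs : List Char) (i j : Nat) (word : List (List Char)) :
    Nat × Nat × List (List Char) :=
  if h : j < cs.length then
    let j' := bwSkip cs j
    if i = j' then bwLoop cs i (j' + 1) word
    else bwLoop cs j' (j' + 1)
      (word ++ [PySem.Chars.lower (PySem.List.slice cs (some (i : Int)) (some (j' : Int)))])
  else (i, j, word)
termination_by cs.length + 1 - j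
decreasing_by
  · have := bwSkip_ge cs j; omega
  · have := bwSkip_ge cs j; omega

-- the post-loop `if not i == j and j < len(text): word.append(text[i:j])`
def bwAfter (cs : List Char) (t : Nat × Nat × List (List Char)) : List (List Char) :=
  match t with
  | (i, j, w) =>
    if ¬ i = j ∧ j < cs.length then
      w ++ [PySem.List.slice cs (some (i : Int)) (some (j : Int))]
    else w

def break_word (text : String) : List String :=
  let cs := text.toList
  let word :=
    if PySem.Chars.isIn ['_'] cs && (PySem.Chars.upper cs == cs) then
      PySem.Chars.splitOn (PySem.Chars.lower cs) ['_']
    else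
      bwAfter cs (bwLoop cs 0 0 [])
  (word.filter (fun w => decide (w.length > 1))).map (fun w => String.ofList w)

-- ===== PORT B =====
def break_word_alt (text : String) : List String :=
  let cs := text.toList
  let words :=
    if PySem.Chars.isIn ['_'] cs && (PySem.Chars.upper cs == cs) then
      PySem.Chars.splitOn (PySem.Chars.lower cs) ['_']
    else
      cs.foldl (fun ws c =>
        if bwUpper c || ws.isEmpty then ws ++ [[PySem.Chars.lowerChar c]]
        else ws.dropLast ++ [ws.getLastD [] ++ [PySem.Chars.lowerChar c]]) []
  (words.filter (fun w => decide (w.length > 1))).map (fun w => String.ofList w)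

-- ===== PRECONDITION & SPEC =====
def Spec_break_word (text : String) (out : List String) : Prop := out = break_word_alt text
instance (text : String) (out : List String) : Decidable (Spec_break_word text out) := by
  unfold Spec_break_word; infer_instance

-- ===== CLAIM (what is proved, stated in full; the proofs are below) =====
def Claim_equal_break_word : Prop := ∀ (text : String), Dom_break_word text → Spec_break_word text (break_word text)

-- ===== LEMMAS AND PROOFS =====

-- A's loop, one segment at a time (proof-side characterisation)
def bwTokA : List Char → List Char → List (List Char)
  | _, [] => []
  | p, x :: xs =>
    let run := (x :: xs).takeWhile (fun c => !bwUpper c)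
    match h : (x :: xs).dropWhile (fun c => !bwUpper c) with
    | [] => [PySem.Chars.lower (p ++ run)]
    | c :: rest'' =>
      if p ++ run = [] then bwTokA [c] rest''
      else PySem.Chars.lower (p ++ run) :: bwTokA [c] rest''
termination_by _ rest => rest.length
decreasing_by
  all_goals
    have h2 := List.length_dropWhile_le (fun c => !bwUpper c) (x :: xs)
    rw [h] at h2; simp at h2 ⊢; omega

-- B's fold, one character at a time (proof-side characterisation)
def bwTokB : List Char → List Char → List (List Char)
  | p, [] => [p]
  | p, c :: rest =>
    if bwUpper c then p :: bwTokB [PySem.Chars.lowerChar c] rest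
    else bwTokB (p ++ [PySem.Chars.lowerChar c]) rest

theorem bwTake_takeWhile {α : Type} (p : α → Bool) (l : List α) :
    l.take (l.takeWhile p).length = l.takeWhile p := by
  induction l with
  | nil => simp
  | cons a l ih =>
    rw [List.takeWhile_cons]
    by_cases hp : p a
    · simp [hp, ih]
    · simp [hp]

theorem bwDrop_dropWhile {α : Type} (p : α → Bool) (l : List α) :
    l.drop (l.takeWhile p).length = l.dropWhile p := by
  calc l.drop (l.takeWhile p).length
      = (l.takeWhile p ++ l.dropWhile p).drop (l.takeWhile p).length := by
        rw [List.takeWhile_append_dropWhile]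
    _ = l.dropWhile p := List.drop_left

theorem bwSkip_eq (cs : List Char) (j : Nat) :
    bwSkip cs j = j + ((cs.drop j).takeWhile (fun c => !bwUpper c)).length := by
  fun_induction bwSkip cs j with
  | case1 j h ih =>
    obtain ⟨h1, h2⟩ := h
    rw [List.getD_eq_getElem _ _ h1] at h2
    rw [ih, List.drop_eq_getElem_cons h1, List.takeWhile_cons]
    simp [h2]
    omega
  | case2 j h =>
    by_cases h1 : j < cs.length
    · have h2 : bwUpper (cs.getD j ' ') = true := by
        rcases Bool.eq_false_or_eq_true (bwUpper (cs.getD j ' ')) with hh | hh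
        · exact hh
        · exact absurd ⟨h1, hh⟩ h
      rw [List.getD_eq_getElem _ _ h1] at h2
      rw [List.drop_eq_getElem_cons h1, List.takeWhile_cons]
      simp [h2]
    · rw [List.drop_eq_nil_of_le (by omega)]
      simp

theorem bwFold_eq (rest : List Char) (ws : List (List Char)) (p : List Char) :
    List.foldl (fun ws c =>
        if bwUpper c || ws.isEmpty then ws ++ [[PySem.Chars.lowerChar c]]
        else ws.dropLast ++ [ws.getLastD [] ++ [PySem.Chars.lowerChar c]]) (ws ++ [p]) rest
      = ws ++ bwTokB p rest := by
  induction rest generalizing ws p with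
  | nil => simp [bwTokB]
  | cons c rest ih =>
    rw [List.foldl_cons]
    by_cases hc : bwUpper c
    · simp only [hc, Bool.true_or, if_pos]
      have : (ws ++ [p]) ++ [[PySem.Chars.lowerChar c]] = (ws ++ [p]) ++ [[PySem.Chars.lowerChar c]] := rfl
      rw [ih (ws ++ [p]) [PySem.Chars.lowerChar c]]
      simp [bwTokB, hc]
    · have hne : (ws ++ [p]).isEmpty = false := by simp
      simp only [hc, hne, Bool.false_or, Bool.false_eq_true, if_false, List.dropLast_concat,
        List.getLastD_concat]
      rw [ih ws (p ++ [PySem.Chars.lowerChar c])]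
      simp [bwTokB, hc]

theorem bwTokB_chunk (run : List Char) (p rest : List Char)
    (h : ∀ c ∈ run, bwUpper c = false) :
    bwTokB p (run ++ rest) = bwTokB (p ++ PySem.Chars.lower run) rest := by
  induction run generalizing p with
  | nil => simp [PySem.Chars.lower]
  | cons a run ih =>
    have ha : bwUpper a = false := h a (by simp)
    rw [List.cons_append]
    show bwTokB p (a :: (run ++ rest)) = _
    rw [bwTokB]
    simp only [ha, Bool.false_eq_true]
    rw [ih (p ++ [PySem.Chars.lowerChar a]) (fun c hc => h c (by simp [hc]))]
    simp [PySem.Chars.lower]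

-- bwTokA on a nonempty list, without destructing it into a cons
theorem bwTokA_ne (p l : List Char) (hl : l ≠ []) :
    bwTokA p l =
      (match l.dropWhile (fun c => !bwUpper c) with
       | [] => [PySem.Chars.lower (p ++ l.takeWhile (fun c => !bwUpper c))]
       | c :: rest'' =>
         if p ++ l.takeWhile (fun c => !bwUpper c) = [] then bwTokA [c] rest''
         else PySem.Chars.lower (p ++ l.takeWhile (fun c => !bwUpper c)) :: bwTokA [c] rest'') := by
  cases l with
  | nil => exact absurd rfl hl
  | cons x xs =>
    rw [bwTokA]
    cases hdw : List.dropWhile (fun c => !bwUpper c) (x :: xs) <;> simp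

theorem bwLoopAux (fuel : Nat) : ∀ (cs : List Char) (i j : Nat) (w : List (List Char)),
    cs.length + 1 - j ≤ fuel → i ≤ j →
    bwAfter cs (bwLoop cs i j w) = w ++ bwTokA ((cs.drop i).take (j - i)) (cs.drop j) := by
  induction fuel with
  | zero =>
    intro cs i j w hf hij
    have hjn : ¬ j < cs.length := by omega
    rw [bwLoop, dif_neg hjn]
    rw [List.drop_eq_nil_of_le (as := cs) (i := j) (by omega)]
    simp [bwAfter, bwTokA, hjn]
  | succ fuel ih =>
    intro cs i j w hf hij
    by_cases hjn : j < cs.length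
    · rw [bwLoop, dif_pos hjn]
      simp only []
      have hskip := bwSkip_eq cs j
      have hrle : ((cs.drop j).takeWhile (fun c => !bwUpper c)).length ≤ cs.length - j := by
        have h1 := (List.takeWhile_prefix (fun c => !bwUpper c) (l := cs.drop j)).length_le
        simpa using h1
      by_cases hii : i = bwSkip cs j
      · rw [if_pos hii]
        have hji : j = i := by omega
        have hr0 : ((cs.drop j).takeWhile (fun c => !bwUpper c)).length = 0 := by omega
        have hrun : (cs.drop j).takeWhile (fun c => !bwUpper c) = [] :=
          List.eq_nil_of_length_eq_zero hr0
        have hdropj : cs.drop j = cs[j] :: cs.drop (j + 1) := List.drop_eq_getElem_cons hjn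
        have hcup : bwUpper cs[j] = true := by
          rw [hdropj, List.takeWhile_cons] at hrun
          by_cases hb : bwUpper cs[j] = true
          · exact hb
          · simp [hb] at hrun
        subst hji
        have hih := ih cs j (bwSkip cs j + 1) w (by omega) (by omega)
        rw [hih]
        have hsk : bwSkip cs j + 1 = j + 1 := by omega
        rw [hsk]
        have htake1 : (cs.drop j).take (j + 1 - j) = [cs[j]] := by
          rw [hdropj]
          have h5 : j + 1 - j = 1 := by omega
          rw [h5]
          rfl
        rw [htake1]
        have hpend0 : (cs.drop j).take (j - j) = [] := by simp
        rw [hpend0, hdropj]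
        rw [bwTokA_ne [] (cs[j]'hjn :: cs.drop (j + 1)) (List.cons_ne_nil _ _)]
        have hdw2 : (cs[j]'hjn :: cs.drop (j + 1)).dropWhile (fun c => !bwUpper c)
            = cs[j]'hjn :: cs.drop (j + 1) := by
          rw [List.dropWhile_cons]; simp [hcup]
        have htw2 : (cs[j]'hjn :: cs.drop (j + 1)).takeWhile (fun c => !bwUpper c) = [] := by
          rw [List.takeWhile_cons]; simp [hcup]
        rw [hdw2, htw2]
        simp
      · rw [if_neg hii]
        have hslice : PySem.List.slice cs (some (i : Int)) (some ((bwSkip cs j : Nat) : Int))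
            = (cs.drop i).take (bwSkip cs j - i) := PySem.List.slice_natCast cs i (bwSkip cs j)
        have hdecomp : (cs.drop i).take (bwSkip cs j - i)
            = (cs.drop i).take (j - i) ++ (cs.drop j).takeWhile (fun c => !bwUpper c) := by
          have h1 : bwSkip cs j - i = (j - i) + ((cs.drop j).takeWhile (fun c => !bwUpper c)).length := by
            omega
          rw [h1, List.take_add]
          congr 1
          rw [List.drop_drop]
          have h2 : i + (j - i) = j := by omega
          rw [h2]
          exact bwTake_takeWhile _ _
        have hdropj' : cs.drop (bwSkip cs j) = (cs.drop j).dropWhile (fun c => !bwUpper c) := by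
          rw [hskip, ← List.drop_drop]
          exact bwDrop_dropWhile _ _
        have hdne : cs.drop j ≠ [] := by
          intro h
          have := List.length_drop (l := cs) (i := j)
          rw [h] at this
          simp at this
          omega
        have hih := ih cs (bwSkip cs j) (bwSkip cs j + 1)
          (w ++ [PySem.Chars.lower (PySem.List.slice cs (some (i : Int)) (some ((bwSkip cs j : Nat) : Int)))])
          (by omega) (by omega)
        rw [hih]
        rw [bwTokA_ne ((cs.drop i).take (j - i)) (cs.drop j) hdne]
        cases hdw : (cs.drop j).dropWhile (fun c => !bwUpper c) with
        | nil =>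
          have hd1 : cs.drop (bwSkip cs j) = [] := by rw [hdropj', hdw]
          have hd2 : cs.drop (bwSkip cs j + 1) = [] := by
            rw [← List.drop_drop (j := bwSkip cs j) (i := 1), hd1]
            rfl
          rw [hd1, hd2]
          simp only [List.take_nil, bwTokA, List.append_nil]
          rw [hslice, hdecomp]
        | cons c rest'' =>
          have hd1 : cs.drop (bwSkip cs j) = c :: rest'' := by rw [hdropj', hdw]
          have hd2 : cs.drop (bwSkip cs j + 1) = rest'' := by
            rw [← List.drop_drop (j := bwSkip cs j) (i := 1), hd1]
            rfl
          have hpne : ¬ ((cs.drop i).take (j - i) ++ (cs.drop j).takeWhile (fun c => !bwUpper c)) = [] := by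
            rw [← hdecomp]
            intro h
            have h3 : (List.take (bwSkip cs j - i) (List.drop i cs)).length
                = min (bwSkip cs j - i) (List.drop i cs).length := List.length_take
            rw [h] at h3
            simp at h3
            omega
          rw [hd1, hd2]
          have h6 : bwSkip cs j + 1 - bwSkip cs j = 1 := by omega
          have ht1 : (c :: rest'').take 1 = [c] := rfl
          rw [h6, ht1, hslice, hdecomp]
          simp [hpne]
    · rw [bwLoop, dif_neg hjn]
      rw [List.drop_eq_nil_of_le (as := cs) (i := j) (by omega)]
      simp [bwAfter, bwTokA, hjn]

theorem bwMainAux (n : Nat) : ∀ (rest p : List Char), rest.length ≤ n → p ≠ [] →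
    (rest = [] → p.length ≤ 1) →
    (bwTokA p rest).filter (fun w => decide (w.length > 1))
      = (bwTokB (PySem.Chars.lower p) rest).filter (fun w => decide (w.length > 1)) := by
  induction n with
  | zero =>
    intro rest p hlen hp hlast
    have : rest = [] := List.eq_nil_of_length_eq_zero (by omega)
    subst this
    have h1 := hlast rfl
    simp [bwTokA, bwTokB, List.filter_cons, PySem.Chars.lower]
    omega
  | succ n ih =>
    intro rest p hlen hp hlast
    cases rest with
    | nil =>
      have h1 := hlast rfl
      simp [bwTokA, bwTokB, List.filter_cons, PySem.Chars.lower]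
      omega
    | cons x xs =>
      have hrnfalse : ∀ c ∈ (x :: xs).takeWhile (fun c => !bwUpper c), bwUpper c = false := by
        intro c hc
        have := List.mem_takeWhile_imp hc
        simpa using this
      have hB : bwTokB (PySem.Chars.lower p) (x :: xs)
          = bwTokB (PySem.Chars.lower (p ++ (x :: xs).takeWhile (fun c => !bwUpper c)))
              ((x :: xs).dropWhile (fun c => !bwUpper c)) := by
        conv_lhs => rw [← List.takeWhile_append_dropWhile (p := fun c => !bwUpper c) (l := x :: xs)]
        rw [bwTokB_chunk _ _ _ hrnfalse]
        simp [PySem.Chars.lower]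
      rw [bwTokA_ne p (x :: xs) (by simp), hB]
      cases hdw : (x :: xs).dropWhile (fun c => !bwUpper c) with
      | nil => simp [bwTokB]
      | cons c rest'' =>
        have hpn : ¬ (p ++ (x :: xs).takeWhile (fun c => !bwUpper c)) = [] := by
          cases p with
          | nil => exact absurd rfl hp
          | cons a as => simp
        have hcup : bwUpper c = true := by
          have hne : (x :: xs).dropWhile (fun c => !bwUpper c) ≠ [] := by rw [hdw]; simp
          have h2 := List.head_dropWhile_not (fun c => !bwUpper c) hne
          simp only [hdw, List.head_cons] at h2
          simpa using h2
        have hlt : rest''.length ≤ n := by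
          have h3 := List.length_dropWhile_le (fun c => !bwUpper c) (x :: xs)
          rw [hdw] at h3
          simp at h3 hlen
          omega
        have ihc := ih rest'' [c] hlt (by simp) (by intro _; simp)
        have hlc : PySem.Chars.lower [c] = [PySem.Chars.lowerChar c] := by
          simp [PySem.Chars.lower]
        rw [hlc] at ihc
        simp only [hpn, if_false, bwTokB, hcup, if_true, List.filter_cons]
        rw [ihc]

theorem bwMain (rest p : List Char) (hp : p ≠ []) (hlast : rest = [] → p.length ≤ 1) :
    (bwTokA p rest).filter (fun w => decide (w.length > 1))
      = (bwTokB (PySem.Chars.lower p) rest).filter (fun w => decide (w.length > 1)) :=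
  bwMainAux rest.length rest p le_rfl hp hlast

theorem bwStart (c : Char) (rest : List Char) :
    (bwTokA [] (c :: rest)).filter (fun w => decide (w.length > 1))
      = (bwTokA [c] rest).filter (fun w => decide (w.length > 1)) := by
  by_cases hc : bwUpper c = true
  · have heq : bwTokA [] (c :: rest) = bwTokA [c] rest := by
      rw [bwTokA_ne [] (c :: rest) (by simp)]
      have hdw : (c :: rest).dropWhile (fun c => !bwUpper c) = c :: rest := by
        rw [List.dropWhile_cons]; simp [hc]
      have htw : (c :: rest).takeWhile (fun c => !bwUpper c) = [] := by
        rw [List.takeWhile_cons]; simp [hc]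
      rw [hdw, htw]
      simp
    rw [heq]
  · cases rest with
    | nil =>
      have hdw : [c].dropWhile (fun c => !bwUpper c) = [] := by
        rw [List.dropWhile_cons]; simp [hc]
      have htw : [c].takeWhile (fun c => !bwUpper c) = [c] := by
        rw [List.takeWhile_cons]; simp [hc]
      rw [bwTokA_ne [] [c] (by simp), hdw, htw]
      simp [bwTokA, PySem.Chars.lower]
    | cons d rs =>
      have htw : (c :: d :: rs).takeWhile (fun c => !bwUpper c)
          = c :: (d :: rs).takeWhile (fun c => !bwUpper c) := by
        rw [List.takeWhile_cons]; simp [hc]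
      have hdw : (c :: d :: rs).dropWhile (fun c => !bwUpper c)
          = (d :: rs).dropWhile (fun c => !bwUpper c) := by
        rw [List.dropWhile_cons]; simp [hc]
      rw [bwTokA_ne [] (c :: d :: rs) (by simp), bwTokA_ne [c] (d :: rs) (by simp), htw, hdw]
      cases hdr : (d :: rs).dropWhile (fun c => !bwUpper c) with
      | nil => simp
      | cons e rest'' => simp

-- ===== VERDICT (by name: the statement is the Claim_ definition above) =====
theorem break_word_spec : Claim_equal_break_word := by
  intro text _
  unfold Spec_break_word
  unfold break_word break_word_alt
  simp only []
  by_cases hbr : (PySem.Chars.isIn ['_'] text.toList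
      && (PySem.Chars.upper text.toList == text.toList)) = true
  · rw [if_pos hbr, if_pos hbr]
  · rw [if_neg hbr, if_neg hbr]
    congr 1
    have hA : bwAfter text.toList (bwLoop text.toList 0 0 []) = bwTokA [] text.toList := by
      have h1 := bwLoopAux (text.toList.length + 1) text.toList 0 0 [] (by omega) (by omega)
      simpa using h1
    rw [hA]
    cases hcs : text.toList with
    | nil => simp [bwTokA]
    | cons c rest =>
      rw [List.foldl_cons]
      have hstep : (if bwUpper c || (List.isEmpty ([] : List (List Char)))
          then ([] : List (List Char)) ++ [[PySem.Chars.lowerChar c]]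
          else ([] : List (List Char)).dropLast
            ++ [([] : List (List Char)).getLastD [] ++ [PySem.Chars.lowerChar c]])
          = [[PySem.Chars.lowerChar c]] := by
        simp
      rw [hstep]
      have hfold := bwFold_eq rest [] [PySem.Chars.lowerChar c]
      simp only [List.nil_append] at hfold
      rw [hfold]
      rw [bwStart c rest]
      have hmain := bwMain rest [c] (by simp) (by intro _; simp)
      have hlc : PySem.Chars.lower [c] = [PySem.Chars.lowerChar c] := by
        simp [PySem.Chars.lower]
      rw [hlc] at hmain
      exact hmain
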